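-- pv_equiv track=rewrite | github.com/wanhaimin/whm_Odoo_project | custom_addons/chatter_ai_assistant/tools/openclaw_backends.py | _looks_like_auth_failure
-- ===== SOURCE A (Python) =====
-- def _looks_like_auth_failure(text):
--     value = (text or "").lower()
--     return any(
--         token in value
--         for token in (
--             "token refresh failed",
--             "oauth token refresh failed",
--             "refresh_token_reused",
--             "please try signing in again",
--         )
--     )
-- ===== SOURCE B (Python) =====
-- import re
--
-- _AUTH_FAILURE_RE = re.compile(
--     "token refresh failed"
--     "|oauth token refresh failed"
--     "|refresh_token_reused"
--     "|please try signing in again"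
-- )
--
--
-- def _looks_like_auth_failure(text):
--     return bool(_AUTH_FAILURE_RE.search((text or "").lower()))
-- ===== Notes on version B (the rewrite author's own statement) =====
-- stated objective: idiomatic
-- what changed: Replaced four separate per-phrase substring membership scans joined by any() with one precompiled alternation regex (the phrases are literal, no metacharacters) searched in a single pass over the lowercased text.
import Mathlib
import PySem

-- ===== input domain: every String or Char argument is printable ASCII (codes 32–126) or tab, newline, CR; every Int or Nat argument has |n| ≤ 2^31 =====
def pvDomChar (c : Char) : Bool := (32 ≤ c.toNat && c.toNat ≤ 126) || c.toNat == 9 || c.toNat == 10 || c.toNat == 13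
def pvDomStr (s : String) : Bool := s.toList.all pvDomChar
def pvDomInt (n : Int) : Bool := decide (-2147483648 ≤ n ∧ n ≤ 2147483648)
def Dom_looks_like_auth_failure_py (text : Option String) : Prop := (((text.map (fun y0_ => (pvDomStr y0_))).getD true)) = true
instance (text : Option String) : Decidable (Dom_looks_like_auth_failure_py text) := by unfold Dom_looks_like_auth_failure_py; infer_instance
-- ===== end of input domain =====

-- B replaces four independent substring-membership scans by one left-to-right scan that
-- checks all four phrases at each position (the regex alternation in Source B); same outputs (idiomatic, not faster).

-- ===== PORT A =====
def looks_like_auth_failure_py (text : Option String) : Bool :=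
  let value := PySem.Str.lower (text.getD "")
  [ "token refresh failed"
  , "oauth token refresh failed"
  , "refresh_token_reused"
  , "please try signing in again" ].any (fun token => PySem.Str.isIn token value)

-- ===== PORT B =====
-- the four literal alternatives of Source B's compiled regex, as char lists
def pvAuthPhrases : List (List Char) :=
  [ "token refresh failed".toList
  , "oauth token refresh failed".toList
  , "refresh_token_reused".toList
  , "please try signing in again".toList ]

-- the single automaton-style scan of Source B's re.search: at each position try every alternative
def pvAuthScan : List Char → Bool
  | [] => false
  | c :: t => pvAuthPhrases.any (fun p => p.isPrefixOf (c :: t)) || pvAuthScan t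

def looks_like_auth_failure_py_alt (text : Option String) : Bool :=
  pvAuthScan (PySem.Chars.lower (text.getD "").toList)

-- ===== PRECONDITION & SPEC =====
def Spec_looks_like_auth_failure_py (text : Option String) (out : Bool) : Prop := out = looks_like_auth_failure_py_alt text
instance (text : Option String) (out : Bool) : Decidable (Spec_looks_like_auth_failure_py text out) := by unfold Spec_looks_like_auth_failure_py; infer_instance

-- ===== CLAIM (what is proved, stated in full; the proofs are below) =====
def Claim_equal_looks_like_auth_failure_py : Prop := ∀ (text : Option String), Dom_looks_like_auth_failure_py text → Spec_looks_like_auth_failure_py text (looks_like_auth_failure_py text)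

-- ===== LEMMAS AND PROOFS =====

-- the scan finds exactly the infix occurrences of some phrase
lemma pvAuthScan_iff (s : List Char) :
    pvAuthScan s = true ↔ ∃ p ∈ pvAuthPhrases, p <:+: s := by
  induction s with
  | nil =>
      simp only [pvAuthScan]
      constructor
      · intro h; exact absurd h (by decide)
      · rintro ⟨p, hp, hinf⟩
        have hnil : p = [] := List.eq_nil_of_infix_nil hinf
        subst hnil
        revert hp; decide
  | cons c t ih =>
      simp only [pvAuthScan, Bool.or_eq_true, List.any_eq_true, ih]
      constructor
      · rintro (⟨p, hp, hpre⟩ | ⟨p, hp, hinf⟩)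
        · exact ⟨p, hp, (List.isPrefixOf_iff_prefix.mp hpre).isInfix⟩
        · exact ⟨p, hp, List.infix_cons_iff.mpr (Or.inr hinf)⟩
      · rintro ⟨p, hp, hinf⟩
        rcases List.infix_cons_iff.mp hinf with hpre | hinf'
        · exact Or.inl ⟨p, hp, List.isPrefixOf_iff_prefix.mpr hpre⟩
        · exact Or.inr ⟨p, hp, hinf'⟩

-- ===== VERDICT (by name: the statement is the Claim_ definition above) =====
theorem looks_like_auth_failure_py_spec : Claim_equal_looks_like_auth_failure_py := by
  intro text _
  unfold Spec_looks_like_auth_failure_py looks_like_auth_failure_py looks_like_auth_failure_py_alt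
  apply Bool.eq_iff_iff.mpr
  rw [pvAuthScan_iff]
  simp only [List.any_eq_true, PySem.Str.isIn_iff_infix, PySem.Str.toList_lower]
  constructor
  · rintro ⟨tok, htok, hinf⟩
    refine ⟨tok.toList, ?_, hinf⟩
    fin_cases htok <;> simp [pvAuthPhrases]
  · rintro ⟨p, hp, hinf⟩
    fin_cases hp <;> [exact ⟨"token refresh failed", by simp, hinf⟩;
      exact ⟨"oauth token refresh failed", by simp, hinf⟩;
      exact ⟨"refresh_token_reused", by simp, hinf⟩;
      exact ⟨"please try signing in again", by simp, hinf⟩]
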